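-- pv_equiv track=rewrite | github.com/dzarmola/cuddly-guacamole_wflow | scripts/extract_subfastas.py | coreToSeq
-- ===== SOURCE A (Python) =====
-- def coreToSeq(seq,seq_start,core_start):
--     """ Given seq and index of the core in this sequence,
--         return alignment index of the core"""
--     core_start-=seq_start
--     if core_start < 0:
--         return (0,0)
--     if core_start == 0:
--         return (0,1)
--     for i,s in enumerate(seq):
--         if not core_start:
--             return (i,1)
--         if s not in ["-","."] and s==s.upper():
--             core_start -= 1
--     else:
--         return (len(seq)-1,0)
-- ===== SOURCE B (Python) =====
-- def coreToSeq(seq, seq_start, core_start):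
--     """ Given seq and index of the core in this sequence,
--         return alignment index of the core"""
--     k = core_start - seq_start
--     if k < 0:
--         return (0, 0)
--     if k == 0:
--         return (0, 1)
--     positions = [i for i, s in enumerate(seq) if s not in ("-", ".") and s == s.upper()]
--     if k <= len(positions):
--         p = positions[k - 1]
--         if p + 1 < len(seq):
--             return (p + 1, 1)
--     return (len(seq) - 1, 0)
-- ===== Notes on version B (the rewrite author's own statement) =====
-- stated objective: alternative
-- what changed: Replaced A's stateful early-exit scan (countdown counter with a one-iteration-delayed return and for-else fall-through) by one full pass that collects the index table of all core (non-gap uppercase) characters and then answers by direct indexing and an arithmetic bounds check.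
import Mathlib
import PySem

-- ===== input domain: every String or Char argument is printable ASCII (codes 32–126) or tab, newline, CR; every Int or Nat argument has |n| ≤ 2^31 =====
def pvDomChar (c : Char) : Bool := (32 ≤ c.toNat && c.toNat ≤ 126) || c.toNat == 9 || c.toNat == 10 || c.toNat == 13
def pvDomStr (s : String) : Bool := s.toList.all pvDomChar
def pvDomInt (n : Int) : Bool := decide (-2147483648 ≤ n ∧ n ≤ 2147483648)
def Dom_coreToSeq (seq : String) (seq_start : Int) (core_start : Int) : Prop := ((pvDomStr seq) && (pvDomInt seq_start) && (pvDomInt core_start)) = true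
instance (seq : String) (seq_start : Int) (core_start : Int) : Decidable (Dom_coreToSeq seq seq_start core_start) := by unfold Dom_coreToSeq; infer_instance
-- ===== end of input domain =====

-- B replaces A's stateful early-exit scan (countdown + one-iteration-delayed return via for-else)
-- by one full scan collecting the indices of all core (non-gap uppercase) characters, then direct
-- indexing into that table; objective: alternative (same O(n) cost, different traversal/state).

-- ===== PORT A =====
-- 's not in ["-","."] and s==s.upper()' for a one-character string s: exact per-char port.
def pvIsCore (c : Char) : Bool := !(c == '-') && !(c == '.') && (PySem.Chars.upperChar c == c)

-- A's for/else loop: 'some r' = an early 'return r' inside the loop, 'none' = fall-through to else.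
def pvLoopA : List Char → Int → Int → Option (Int × Int)
  | [], _, _ => none
  | c :: rest, i, k =>
      if k = 0 then some (i, 1)
      else pvLoopA rest (i + 1) (if pvIsCore c then k - 1 else k)

def coreToSeq (seq : String) (seq_start : Int) (core_start : Int) : Int × Int :=
  let k := core_start - seq_start
  if k < 0 then (0, 0)
  else if k = 0 then (0, 1)
  else
    match pvLoopA seq.toList 0 k with
    | some r => r
    | none => ((seq.toList.length : Int) - 1, 0)

-- ===== PORT B =====
def coreToSeq_alt (seq : String) (seq_start : Int) (core_start : Int) : Int × Int :=
  let k := core_start - seq_start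
  if k < 0 then (0, 0)
  else if k = 0 then (0, 1)
  else
    let positions := ((PySem.List.enumerate seq.toList 0).filter (fun p => pvIsCore p.2)).map (fun p => p.1)
    let n : Int := seq.toList.length
    if k ≤ (positions.length : Int) then
      let p := positions.getD (k - 1).toNat 0   -- positions[k-1]: index valid since 1 ≤ k ≤ len(positions)
      if p + 1 < n then (p + 1, 1) else (n - 1, 0)
    else (n - 1, 0)

-- ===== PRECONDITION & SPEC =====
def Spec_coreToSeq (seq : String) (seq_start : Int) (core_start : Int) (out : Int × Int) : Prop := out = coreToSeq_alt seq seq_start core_start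
instance (seq : String) (seq_start : Int) (core_start : Int) (out : Int × Int) : Decidable (Spec_coreToSeq seq seq_start core_start out) := by unfold Spec_coreToSeq; infer_instance

-- ===== CLAIM (what is proved, stated in full; the proofs are below) =====
def Claim_equal_coreToSeq : Prop := ∀ (seq : String) (seq_start : Int) (core_start : Int), Dom_coreToSeq seq seq_start core_start → Spec_coreToSeq seq seq_start core_start (coreToSeq seq seq_start core_start)

-- ===== LEMMAS AND PROOFS =====

-- positions of core characters in l, indices starting at i (B's comprehension, generalized start)
def pvPosF (i : Int) (l : List Char) : List Int :=
  ((PySem.List.enumerate l i).filter (fun p => pvIsCore p.2)).map (fun p => p.1)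

theorem pvPosF_nil (i : Int) : pvPosF i [] = [] := by
  simp [pvPosF, PySem.List.enumerate_nil]

theorem pvPosF_cons (i : Int) (c : Char) (t : List Char) :
    pvPosF i (c :: t) = if pvIsCore c then i :: pvPosF (i+1) t else pvPosF (i+1) t := by
  simp [pvPosF, PySem.List.enumerate_cons, List.filter_cons]
  by_cases h : pvIsCore c <;> simp [h]

theorem pvLoopA_zero (t : List Char) (j : Int) :
    pvLoopA t j 0 = match t with | [] => none | _ :: _ => some (j, 1) := by
  cases t <;> simp [pvLoopA]

theorem pvLoopA_eq (l : List Char) (i : Int) (m : ℕ) :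
    pvLoopA l i ((m : Int) + 1) =
      if (m + 1 : ℕ) ≤ (pvPosF i l).length then
        (if (pvPosF i l).getD m 0 + 1 < i + l.length then some ((pvPosF i l).getD m 0 + 1, 1) else none)
      else none := by
  induction l generalizing i m with
  | nil => simp [pvLoopA, pvPosF_nil]
  | cons c t ih =>
    have hne : ((m : Int) + 1) ≠ 0 := by omega
    rw [pvPosF_cons]
    simp only [pvLoopA]
    rw [if_neg hne]
    by_cases hc : pvIsCore c = true
    · rw [if_pos hc, if_pos hc]
      cases m with
      | zero =>
        have h01 : ((0 : ℕ) : Int) + 1 - 1 = 0 := by norm_num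
        rw [h01, pvLoopA_zero]
        cases t with
        | nil =>
          rw [pvPosF_nil]
          simp
        | cons d u =>
          have hl : (0 + 1 : ℕ) ≤ (i :: pvPosF (i+1) (d :: u)).length := by
            simp
          rw [if_pos hl, List.getD_cons_zero]
          have hlt : i + 1 < i + (((c :: d :: u).length : ℕ) : Int) := by
            simp only [List.length_cons]
            push_cast
            omega
          rw [if_pos hlt]
      | succ m' =>
        have hstep : ((m' + 1 : ℕ) : Int) + 1 - 1 = ((m' : ℕ) : Int) + 1 := by push_cast; ring
        rw [hstep, ih, List.getD_cons_succ]
        have h2 : i + (((c :: t).length : ℕ) : Int) = (i + 1) + ((t.length : ℕ) : Int) := by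
          simp only [List.length_cons]
          push_cast
          ring
        rw [h2]
        simp only [List.length_cons, Nat.add_le_add_iff_right]
    · rw [if_neg hc, if_neg hc, ih]
      have h2 : i + (((c :: t).length : ℕ) : Int) = (i + 1) + ((t.length : ℕ) : Int) := by
        simp only [List.length_cons]
        push_cast
        ring
      rw [h2]

-- ===== VERDICT (by name: the statement is the Claim_ definition above) =====
theorem coreToSeq_spec : Claim_equal_coreToSeq := by
  intro seq seq_start core_start _
  unfold Spec_coreToSeq coreToSeq coreToSeq_alt
  set k := core_start - seq_start with hk
  by_cases h0 : k < 0
  · simp [h0]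
  · by_cases h1 : k = 0
    · simp [h1]
    · simp only [if_neg h0, if_neg h1]
      obtain ⟨m, hm⟩ : ∃ m : ℕ, k = (m : Int) + 1 := ⟨(k - 1).toNat, by omega⟩
      have hP : ((PySem.List.enumerate seq.toList 0).filter (fun p => pvIsCore p.2)).map (fun p => p.1)
          = pvPosF 0 seq.toList := rfl
      rw [hP, hm, pvLoopA_eq]
      have htn : (((m : Int) + 1) - 1).toNat = m := by omega
      rw [htn]
      by_cases hlen : (m + 1 : ℕ) ≤ (pvPosF 0 seq.toList).length
      · have hlen' : ((m : Int) + 1) ≤ ((pvPosF 0 seq.toList).length : Int) := by exact_mod_cast hlen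
        rw [if_pos hlen, if_pos hlen']
        by_cases hin : (pvPosF 0 seq.toList).getD m 0 + 1 < ((seq.toList.length : ℕ) : Int)
        · have hin0 : (pvPosF 0 seq.toList).getD m 0 + 1 < (0 : Int) + ((seq.toList.length : ℕ) : Int) := by omega
          rw [if_pos hin0, if_pos hin]
        · have hin0 : ¬ ((pvPosF 0 seq.toList).getD m 0 + 1 < (0 : Int) + ((seq.toList.length : ℕ) : Int)) := by omega
          rw [if_neg hin0, if_neg hin]
      · have hlen' : ¬ (((m : Int) + 1) ≤ ((pvPosF 0 seq.toList).length : Int)) := by exact_mod_cast hlen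
        rw [if_neg hlen, if_neg hlen']
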